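-- pv_equiv track=rewrite | github.com/devisskz/Python | Algorithm Design/ps3pr2.py | num_multiples
-- ===== SOURCE A (Python) =====
-- def num_multiples(m, values):
--     """takes an integer m and a list of integers values and returns the number
--     of integers in values that are multiples of m"""
--     if values == []:
--         return 0
--     else:
--         num_rest = num_multiples(m,values[1:]) # recursive call
--         if values[0]%m == 0: # if elem 1 in list is multiple
--             return 1+num_rest #add 1 to num_rest
--         else:
--             return num_rest #otherwise, return existing num rest
-- ===== SOURCE B (Python) =====
-- def num_multiples(m, values):
--     count = 0
--     for v in values:
--         if v % m == 0:
--             count += 1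
--     return count
-- ===== Notes on version B (the rewrite author's own statement) =====
-- stated objective: simpler
-- what changed: Replaces the tail-slice recursion with a single iterative for-loop maintaining a running counter.
import Mathlib
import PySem

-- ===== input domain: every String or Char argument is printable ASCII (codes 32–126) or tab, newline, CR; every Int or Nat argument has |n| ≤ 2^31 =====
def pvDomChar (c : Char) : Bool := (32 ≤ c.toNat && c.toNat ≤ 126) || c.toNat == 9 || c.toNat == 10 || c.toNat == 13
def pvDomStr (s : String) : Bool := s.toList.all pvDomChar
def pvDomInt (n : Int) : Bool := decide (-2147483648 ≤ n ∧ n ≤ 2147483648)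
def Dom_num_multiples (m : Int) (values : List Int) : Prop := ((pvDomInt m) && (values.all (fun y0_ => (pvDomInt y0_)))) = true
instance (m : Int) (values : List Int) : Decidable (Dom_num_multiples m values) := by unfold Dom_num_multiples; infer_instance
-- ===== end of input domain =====

-- B replaces the tail-slice recursion with an iterative loop over a running counter; same return value.
-- ===== PORT A =====
def num_multiples (m : Int) (values : List Int) : Int :=
  match values with
  | [] => 0
  | v :: rest =>
    let num_rest := num_multiples m rest
    if PySem.Int.mod v m = 0 then 1 + num_rest else num_rest

-- ===== PORT B =====
def num_multiples_alt (m : Int) (values : List Int) : Int :=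
  values.foldl (fun count v => if PySem.Int.mod v m = 0 then count + 1 else count) 0

-- ===== PRECONDITION & SPEC =====
-- Pre_ excludes exactly the inputs where Python's '%' raises ZeroDivisionError: m = 0 with a nonempty list.
def Pre_num_multiples (m : Int) (values : List Int) : Prop := values = [] ∨ m ≠ 0
instance (m : Int) (values : List Int) : Decidable (Pre_num_multiples m values) := by unfold Pre_num_multiples; infer_instance
def pvWitness_num_multiples : Int × List Int := (3, [1, 3, 6, 7])

def Spec_num_multiples (m : Int) (values : List Int) (out : Int) : Prop := out = num_multiples_alt m values
instance (m : Int) (values : List Int) (out : Int) : Decidable (Spec_num_multiples m values out) := by unfold Spec_num_multiples; infer_instance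

-- ===== CLAIM (what is proved, stated in full; the proofs are below) =====
def Claim_equal_num_multiples : Prop := ∀ (m : Int) (values : List Int), Dom_num_multiples m values → Pre_num_multiples m values → Spec_num_multiples m values (num_multiples m values)

-- ===== LEMMAS AND PROOFS =====
lemma foldl_count (m : Int) (values : List Int) (c : Int) :
    values.foldl (fun count v => if PySem.Int.mod v m = 0 then count + 1 else count) c
      = c + num_multiples m values := by
  induction values generalizing c with
  | nil => simp [num_multiples]
  | cons v rest ih =>
    simp only [List.foldl_cons, num_multiples, ih]
    split <;> ring

-- ===== VERDICT (by name: the statement is the Claim_ definition above) =====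
theorem num_multiples_spec : Claim_equal_num_multiples := by
  intro m values _ _
  unfold Spec_num_multiples num_multiples_alt
  rw [foldl_count]
  ring
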